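-- pv_equiv track=rewrite | github.com/stepochek/work | w17.py | chotka
-- ===== SOURCE A (Python) =====
-- def chotka(i):
--     spisok = []
--     integer = 0
--     if len(i) % 2 == 0:
--         for j in i:
--             if j == ' ':
--                 spisok.append(integer)
--                 integer = 0
--             else:
--                 integer += 1
--     return spisok
-- ===== SOURCE B (Python) =====
-- def chotka(i):
--     if len(i) % 2 != 0:
--         return []
--     parts = i.split(' ')
--     return [len(p) for p in parts[:-1]]
-- ===== Notes on version B (the rewrite author's own statement) =====
-- stated objective: idiomatic
-- what changed: Replaces the per-character loop with a running counter by tokenizing with str.split on a single-space separator and mapping len over all parts except the last (which A never counts); the tokenizing is done by the C-level str.split instead of a Python-level per-character loop.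
import Mathlib
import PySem

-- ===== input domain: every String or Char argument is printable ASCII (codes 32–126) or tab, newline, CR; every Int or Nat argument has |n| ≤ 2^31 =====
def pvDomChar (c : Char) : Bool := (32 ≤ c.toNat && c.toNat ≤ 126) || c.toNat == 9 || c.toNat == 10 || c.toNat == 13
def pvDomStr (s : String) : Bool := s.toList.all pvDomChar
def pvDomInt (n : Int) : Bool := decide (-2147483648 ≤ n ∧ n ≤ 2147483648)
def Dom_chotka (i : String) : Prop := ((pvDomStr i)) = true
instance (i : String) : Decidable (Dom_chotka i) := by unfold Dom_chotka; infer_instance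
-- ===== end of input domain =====

-- B tokenizes with split(' ') and maps len over all parts but the last, instead of A's per-character counter loop (idiomatic; same cost).

-- ===== PORT A =====
def chotka (i : String) : List Int :=
  if PySem.Int.mod (PySem.Str.len i) 2 == 0 then
    (i.toList.foldl
      (fun (st : List Int × Int) j =>
        if j = ' ' then (st.1 ++ [st.2], 0) else (st.1, st.2 + 1))
      ([], 0)).1
  else []

-- ===== PORT B =====
def chotka_alt (i : String) : List Int :=
  if PySem.Int.mod (PySem.Str.len i) 2 == 0 then
    (PySem.Chars.splitOn i.toList " ".toList).dropLast.map (fun p => (p.length : Int))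
  else []

-- ===== PRECONDITION & SPEC =====
def Spec_chotka (i : String) (out : List Int) : Prop := out = chotka_alt i
instance (i : String) (out : List Int) : Decidable (Spec_chotka i out) := by unfold Spec_chotka; infer_instance

-- ===== CLAIM (what is proved, stated in full; the proofs are below) =====
def Claim_equal_chotka : Prop := ∀ (i : String), Dom_chotka i → Spec_chotka i (chotka i)

-- ===== LEMMAS AND PROOFS =====

-- A's loop as a plain recursion on the remaining characters, carrying the running count.
def pvLoopA : List Char → Int → List Int
  | [], _ => []
  | c :: rest, n => if c = ' ' then n :: pvLoopA rest 0 else pvLoopA rest (n + 1)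

-- split(' ') as a plain recursion, carrying the (reversed) current part.
def pvParts : List Char → List Char → List (List Char)
  | [], cur => [cur.reverse]
  | c :: rest, cur => if c = ' ' then cur.reverse :: pvParts rest [] else pvParts rest (c :: cur)

theorem pvParts_ne_nil (l cur : List Char) : pvParts l cur ≠ [] := by
  induction l generalizing cur with
  | nil => simp [pvParts]
  | cons c rest ih => simp only [pvParts]; split_ifs <;> simp [ih]

theorem pvGo_eq_parts (fuel : Nat) (l cur : List Char) (acc : List (List Char))
    (h : l.length ≤ fuel) :
    PySem.Chars.splitOn.go [' '] fuel l cur acc = acc.reverse ++ pvParts l cur := by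
  induction fuel generalizing l cur acc with
  | zero =>
    interval_cases hl : l.length
    · simp at hl; subst hl
      simp [PySem.Chars.splitOn.go, pvParts]
  | succ fuel ih =>
    cases l with
    | nil => simp [PySem.Chars.splitOn.go, pvParts]
    | cons c rest =>
      simp only [PySem.Chars.splitOn.go, pvParts]
      by_cases hc : c = ' '
      · subst hc
        rw [if_pos (by simp [List.isPrefixOf]), if_pos rfl]
        rw [ih _ _ _ (by simpa using Nat.le_of_succ_le_succ h)]
        simp
      · rw [if_neg (by simp [List.isPrefixOf]; exact fun h => hc h.symm), if_neg hc]
        exact ih _ _ _ (by simpa using Nat.le_of_succ_le_succ h)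

theorem pvSplitOn_eq_parts (l : List Char) :
    PySem.Chars.splitOn l [' '] = pvParts l [] := by
  unfold PySem.Chars.splitOn
  rw [pvGo_eq_parts _ _ _ _ (Nat.le_succ _)]
  simp

theorem pvParts_dropLast_map (l cur : List Char) :
    (pvParts l cur).dropLast.map (fun p => (p.length : Int)) = pvLoopA l (cur.length : Int) := by
  induction l generalizing cur with
  | nil => simp [pvParts, pvLoopA]
  | cons c rest ih =>
    simp only [pvParts, pvLoopA]
    by_cases hc : c = ' '
    · rw [if_pos hc, if_pos hc]
      rw [List.dropLast_cons_of_ne_nil (pvParts_ne_nil rest [])]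
      simpa using ih []
    · rw [if_neg hc, if_neg hc]
      simpa using ih (c :: cur)

theorem pvFoldA_eq (l : List Char) (sp : List Int) (n : Int) :
    (l.foldl
      (fun (st : List Int × Int) j =>
        if j = ' ' then (st.1 ++ [st.2], 0) else (st.1, st.2 + 1))
      (sp, n)).1 = sp ++ pvLoopA l n := by
  induction l generalizing sp n with
  | nil => simp [pvLoopA]
  | cons c rest ih =>
    simp only [List.foldl_cons, pvLoopA]
    by_cases hc : c = ' '
    · rw [if_pos hc, if_pos hc, ih]; simp
    · rw [if_neg hc, if_neg hc, ih]

-- ===== VERDICT (by name: the statement is the Claim_ definition above) =====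
theorem chotka_spec : Claim_equal_chotka := by
  intro i _
  unfold Spec_chotka chotka chotka_alt
  by_cases h : PySem.Int.mod (PySem.Str.len i) 2 == 0
  · rw [if_pos h, if_pos h]
    rw [pvFoldA_eq, show " ".toList = [' '] from rfl, pvSplitOn_eq_parts]
    simpa using (pvParts_dropLast_map i.toList []).symm
  · rw [if_neg h, if_neg h]
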